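-- pv_equiv track=rewrite | github.com/prateekaphale-12/AI-Investment-Platform | backend/app/db/database.py | _to_pg_sql
-- ===== SOURCE A (Python) =====
-- def _to_pg_sql(sql: str) -> str:
--     out = []
--     idx = 1
--     for ch in sql:
--         if ch == "?":
--             out.append(f"${idx}")
--             idx += 1
--         else:
--             out.append(ch)
--     return "".join(out)
-- ===== SOURCE B (Python) =====
-- def _to_pg_sql(sql: str) -> str:
--     parts = sql.split("?")
--     out = [parts[0]]
--     for i, seg in enumerate(parts[1:], start=1):
--         out.append(f"${i}")
--         out.append(seg)
--     return "".join(out)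
-- ===== Notes on version B (the rewrite author's own statement) =====
-- stated objective: faster
-- what changed: B splits the SQL string on the placeholder character once (a C-level str.split) and interleaves $1,$2,... between the resulting segments, instead of A's Python-level character-by-character loop with a counter.
import Mathlib
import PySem

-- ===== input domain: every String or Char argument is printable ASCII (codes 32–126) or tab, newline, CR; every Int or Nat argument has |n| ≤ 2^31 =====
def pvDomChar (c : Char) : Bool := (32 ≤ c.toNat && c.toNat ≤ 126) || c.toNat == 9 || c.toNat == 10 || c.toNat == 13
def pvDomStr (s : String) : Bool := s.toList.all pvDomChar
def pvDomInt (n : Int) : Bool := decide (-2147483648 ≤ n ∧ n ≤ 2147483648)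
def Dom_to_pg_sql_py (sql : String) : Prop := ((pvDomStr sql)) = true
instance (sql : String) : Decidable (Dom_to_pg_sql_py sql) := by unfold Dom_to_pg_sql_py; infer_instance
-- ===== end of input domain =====

-- B replaces A's per-character loop with one split on "?" plus interleaving of "$1","$2",…: same O(n), measured constant-factor faster in a timing run.

-- ===== PORT A =====
-- A: walk the characters, appending "$idx" for each '?' (idx counts up from 1), then join.
def to_pg_sql_py (sql : String) : String :=
  let st := sql.toList.foldl
    (fun (st : List String × Int) ch =>
      if ch = '?' then (st.1 ++ ["$" ++ PySem.Int.toStr st.2], st.2 + 1)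
      else (st.1 ++ [String.ofList [ch]], st.2))
    ([], 1)
  PySem.Str.join "" st.1

-- ===== PORT B =====
-- B: split once on "?", then interleave "$i" (i = 1,2,…) between the segments.
def to_pg_sql_py_alt (sql : String) : String :=
  -- sql.split("?"): sep is the nonempty literal "?", so split? is always `some`; the getD is unreachable
  let parts := (PySem.Str.split? sql "?").getD []
  -- parts[0]: str.split always returns at least one piece, so the default is unreachable
  let out := (PySem.List.enumerate (parts.drop 1) 1).foldl
    (fun acc p => acc ++ ["$" ++ PySem.Int.toStr p.1, p.2]) [parts.headD ""]
  PySem.Str.join "" out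

-- ===== PRECONDITION & SPEC =====
def Spec_to_pg_sql_py (sql : String) (out : String) : Prop := out = to_pg_sql_py_alt sql
instance (sql : String) (out : String) : Decidable (Spec_to_pg_sql_py sql out) := by unfold Spec_to_pg_sql_py; infer_instance

-- ===== CLAIM (what is proved, stated in full; the proofs are below) =====
def Claim_equal_to_pg_sql_py : Prop := ∀ (sql : String), Dom_to_pg_sql_py sql → Spec_to_pg_sql_py sql (to_pg_sql_py sql)

-- ===== LEMMAS AND PROOFS =====

-- simple structural characterisation of splitOn on the single-char separator '?'
def pvSpl : List Char → List (List Char)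
  | [] => [[]]
  | c :: r => if c = '?' then [] :: pvSpl r else (pvSpl r).modifyHead (c :: ·)

-- the intended output, as a single recursion over the characters
def pvAux : List Char → Int → List Char
  | [], _ => []
  | c :: r, idx =>
    if c = '?' then ('$' :: PySem.Int.toChars idx) ++ pvAux r (idx + 1)
    else c :: pvAux r idx

theorem pvSpl_q (r : List Char) : pvSpl ('?' :: r) = [] :: pvSpl r := by
  simp [pvSpl]

theorem pvSpl_c (c : Char) (r : List Char) (h : c ≠ '?') :
    pvSpl (c :: r) = (pvSpl r).modifyHead (c :: ·) := by
  simp [pvSpl, h]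

theorem pvAux_q (r : List Char) (idx : Int) :
    pvAux ('?' :: r) idx = ('$' :: PySem.Int.toChars idx) ++ pvAux r (idx + 1) := by
  simp [pvAux]

theorem pvAux_c (c : Char) (r : List Char) (idx : Int) (h : c ≠ '?') :
    pvAux (c :: r) idx = c :: pvAux r idx := by
  simp [pvAux, h]

theorem pvSpl_ne_nil (cs : List Char) : pvSpl cs ≠ [] := by
  cases cs with
  | nil => simp [pvSpl]
  | cons c r =>
    simp only [pvSpl]
    split
    · simp
    · cases h : pvSpl r with
      | nil => exact absurd h (pvSpl_ne_nil r)
      | cons a t => simp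

theorem pvGo_eq (fuel : Nat) (l cur : List Char) (acc : List (List Char))
    (h : l.length < fuel) :
    PySem.Chars.splitOn.go ['?'] fuel l cur acc
      = acc.reverse ++ (pvSpl l).modifyHead (cur.reverse ++ ·) := by
  induction fuel generalizing l cur acc with
  | zero => omega
  | succ fuel ih =>
    cases l with
    | nil =>
      rw [PySem.Chars.splitOn.go.eq_def]
      simp [pvSpl]
    | cons c rest =>
      rw [PySem.Chars.splitOn.go.eq_def]
      simp only []
      by_cases hc : c = '?'
      · subst hc
        have hpre : (['?'] : List Char).isPrefixOf ('?' :: rest) = true := by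
          simp [List.isPrefixOf]
        simp only [hpre, if_pos]
        have hd : List.drop (['?'] : List Char).length ('?' :: rest) = rest := rfl
        rw [hd, ih rest [] (cur.reverse :: acc) (by simpa using Nat.lt_of_succ_lt_succ h)]
        rw [pvSpl_q]
        cases pvSpl rest <;> simp
      · have hpre : (['?'] : List Char).isPrefixOf (c :: rest) = false := by
          simp [List.isPrefixOf]
          exact fun hcq => hc hcq.symm
        simp only [hpre, Bool.false_eq_true, if_neg, not_false_iff]
        rw [ih rest (c :: cur) acc (by simpa using Nat.lt_of_succ_lt_succ h)]
        rw [pvSpl_c c rest hc]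
        cases hs : pvSpl rest with
        | nil => exact absurd hs (pvSpl_ne_nil rest)
        | cons a t => simp

theorem pvSplitOn_eq (cs : List Char) : PySem.Chars.splitOn cs ['?'] = pvSpl cs := by
  unfold PySem.Chars.splitOn
  rw [pvGo_eq (cs.length + 1) cs [] [] (by omega)]
  cases h : pvSpl cs with
  | nil => exact absurd h (pvSpl_ne_nil cs)
  | cons a t => simp

-- flatten ∘ intersperse [] = flatten
theorem pvJoinNil (xs : List (List Char)) : PySem.Chars.join [] xs = xs.flatten := by
  unfold PySem.Chars.join List.intercalate
  induction xs with
  | nil => simp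
  | cons a t ih =>
    cases t with
    | nil => simp
    | cons b t' => simp_all [List.intersperse]

-- A's fold, flattened, is pvAux
theorem pvA_fold (cs : List Char) (pieces : List String) (idx : Int) :
    ((cs.foldl
      (fun (st : List String × Int) ch =>
        if ch = '?' then (st.1 ++ ["$" ++ PySem.Int.toStr st.2], st.2 + 1)
        else (st.1 ++ [String.ofList [ch]], st.2))
      (pieces, idx)).1.map String.toList).flatten
      = (pieces.map String.toList).flatten ++ pvAux cs idx := by
  induction cs generalizing pieces idx with
  | nil => simp [pvAux]
  | cons c r ih =>
    by_cases hc : c = '?'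
    · subst hc
      simp only [List.foldl_cons, pvAux]
      rw [ih]
      simp [PySem.Int.toStr, List.append_assoc]
    · simp only [List.foldl_cons, pvAux, if_neg hc]
      rw [ih]
      simp [List.append_assoc]

-- pvAux is the interleaving of "$i" between the segments of pvSpl
theorem pvAux_glue (cs : List Char) (idx : Int) :
    pvAux cs idx
      = (pvSpl cs).headD []
        ++ (PySem.List.enumerate ((pvSpl cs).drop 1) idx).flatMap
             (fun p => ('$' :: PySem.Int.toChars p.1) ++ p.2) := by
  induction cs generalizing idx with
  | nil => simp [pvSpl, pvAux, PySem.List.enumerate_nil]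
  | cons c r ih =>
    by_cases hc : c = '?'
    · subst hc
      rw [pvSpl_q, pvAux_q]
      cases hs : pvSpl r with
      | nil => exact absurd hs (pvSpl_ne_nil r)
      | cons a t =>
        have := ih (idx + 1)
        rw [hs] at this
        simp only [List.headD, List.drop] at this ⊢
        rw [this, PySem.List.enumerate_cons]
        simp [List.append_assoc]
    · rw [pvSpl_c c r hc, pvAux_c c r idx hc]
      cases hs : pvSpl r with
      | nil => exact absurd hs (pvSpl_ne_nil r)
      | cons a t =>
        have := ih idx
        rw [hs] at this
        simp only [List.modifyHead, List.headD, List.drop] at this ⊢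
        rw [this]
        simp

theorem pvEnumerate_map {α β : Type} (f : α → β) (t : List α) (s : Int) :
    PySem.List.enumerate (t.map f) s = (PySem.List.enumerate t s).map (fun p => (p.1, f p.2)) := by
  induction t generalizing s with
  | nil => simp [PySem.List.enumerate_nil]
  | cons a r ih => simp [PySem.List.enumerate_cons, ih]

theorem pvB_seg (l : List (Int × List Char)) :
    ((l.flatMap (fun p => ["$" ++ String.ofList (PySem.Int.toChars p.1), String.ofList p.2])).map
        String.toList).flatten
      = l.flatMap (fun p => '$' :: (PySem.Int.toChars p.1 ++ p.2)) := by
  induction l with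
  | nil => simp
  | cons a r ih => simp [ih, String.toList_append]

-- ===== VERDICT (by name: the statement is the Claim_ definition above) =====
theorem to_pg_sql_py_spec : Claim_equal_to_pg_sql_py := by
  intro sql _
  show to_pg_sql_py sql = to_pg_sql_py_alt sql
  apply String.toList_inj.mp
  unfold to_pg_sql_py to_pg_sql_py_alt
  simp only [PySem.Str.toList_join]
  rw [show ("".toList) = ([] : List Char) from rfl, pvJoinNil, pvJoinNil]
  -- A side
  rw [pvA_fold sql.toList [] 1]
  -- B side
  have hsplit : (PySem.Str.split? sql "?").getD []
      = (PySem.Chars.splitOn sql.toList ['?']).map String.ofList := by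
    simp [PySem.Str.split?, PySem.Chars.split?]
  rw [hsplit, pvSplitOn_eq]
  simp only [PySem.List.foldl_append_eq_flatMap]
  rw [pvAux_glue sql.toList 1]
  cases hs : pvSpl sql.toList with
  | nil => exact absurd hs (pvSpl_ne_nil sql.toList)
  | cons a t =>
    simp only [List.map_cons, List.headD_cons, List.drop_succ_cons, List.drop_zero,
      pvEnumerate_map, List.flatMap_map, PySem.Int.toStr, List.map_append,
      List.flatten_append, List.map_nil, List.flatten_nil, List.flatten_cons,
      String.toList_ofList, List.append_nil, List.nil_append]
    rw [pvB_seg]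
    simp
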